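-- pv_equiv track=rewrite | github.com/yahayuta/ai_bot_app | module_prompt_builder.py | parse_user_input
-- ===== SOURCE A (Python) =====
-- from typing import List, Dict, Optional
--
-- def parse_user_input(user_text: str) -> Dict[str, str]:
--     """
--     Parse user input to extract prompt components.
--     Expected format: "subject | style:value | location:value | art:value"
--     """
--     parts = user_text.split('|')
--     result = {
--         'base_prompt': parts[0].strip(),
--         'style': None,
--         'location': None,
--         'art_style': None
--     }
--
--     for part in parts[1:]:
--         part = part.strip()
--         if ':' in part:
--             key, value = part.split(':', 1)
--             key = key.strip().lower()
--             value = value.strip()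
--
--             if key in ['style', 'location', 'art']:
--                 result[f"{key}_style" if key == 'art' else key] = value
--
--     return result
-- ===== SOURCE B (Python) =====
-- def parse_user_input(user_text: str):
--     """Each field is found by its own backward search (first match from the end),
--     instead of a forward pass writing into a dict."""
--     parts = user_text.split('|')
--
--     def field(name):
--         for raw in reversed(parts[1:]):
--             part = raw.strip()
--             if ':' in part:
--                 key, value = part.split(':', 1)
--                 if key.strip().lower() == name:
--                     return value.strip()
--         return None
--
--     return {
--         'base_prompt': parts[0].strip(),
--         'style': field('style'),
--         'location': field('location'),
--         'art_style': field('art'),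
--     }
-- ===== Notes on version B (the rewrite author's own statement) =====
-- stated objective: alternative
-- what changed: B replaces A's single forward pass that filters keys and mutates a result dict by three independent backward searches, one per field, each returning the first matching key:value pair from the end (equivalent to A's last-wins overwrite).
import Mathlib
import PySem

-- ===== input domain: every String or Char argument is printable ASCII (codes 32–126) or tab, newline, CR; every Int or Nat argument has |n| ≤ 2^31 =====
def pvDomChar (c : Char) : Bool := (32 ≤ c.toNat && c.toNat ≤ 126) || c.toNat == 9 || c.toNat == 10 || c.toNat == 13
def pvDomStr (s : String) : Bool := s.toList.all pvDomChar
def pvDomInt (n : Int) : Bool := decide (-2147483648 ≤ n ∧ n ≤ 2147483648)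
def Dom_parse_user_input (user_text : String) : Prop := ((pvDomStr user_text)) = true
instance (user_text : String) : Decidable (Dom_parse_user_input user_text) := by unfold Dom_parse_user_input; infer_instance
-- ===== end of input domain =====

-- B finds each field by its own backward search (first match from the end) instead of a
-- forward pass mutating a result dict (alternative decomposition; same cost).

-- ===== PORT A =====
-- key.strip().lower() of the part's first split piece
def pvKey (part : String) : String :=
  PySem.Str.lower (PySem.Str.strip (((PySem.Str.splitMax? part ":" 1).getD []).getD 0 ""))
-- value.strip() of the part's second split piece (present whenever ':' is in part)
def pvVal (part : String) : String :=
  PySem.Str.strip (((PySem.Str.splitMax? part ":" 1).getD []).getD 1 "")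

-- A's loop body: part = part.strip(); if ':' in part: ... if key in [...]: result[...] = value
def stepA (r : PySem.Dict String (Option String)) (part0 : String) : PySem.Dict String (Option String) :=
  let part := PySem.Str.strip part0
  if PySem.Str.isIn ":" part then
    let key := pvKey part
    if key ∈ ["style", "location", "art"] then
      r.insert (if key == "art" then "art_style" else key) (some (pvVal part))
    else r
  else r

-- parts[0] is ported as headD "" : str.split always returns a nonempty list, so Python never raises here.
def parse_user_input (user_text : String) : List (String × Option String) :=
  let parts : List String := (PySem.Str.split? user_text "|").getD []
  let result : PySem.Dict String (Option String) :=
    (((PySem.Dict.empty.insert "base_prompt" (some (PySem.Str.strip (parts.headD "")))).insert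
        "style" none).insert "location" none).insert "art_style" none
  ((parts.drop 1).foldl stepA result).items

-- ===== PORT B =====
-- B's helper `field`: walk the reversed tail, return the first part whose key matches
def findField (name : String) : List String → Option String
  | [] => none
  | raw :: tl =>
    let part := PySem.Str.strip raw
    if PySem.Str.isIn ":" part then
      if pvKey part == name then some (pvVal part) else findField name tl
    else findField name tl

def parse_user_input_alt (user_text : String) : List (String × Option String) :=
  let parts : List String := (PySem.Str.split? user_text "|").getD []
  let rev : List String := (parts.drop 1).reverse
  [("base_prompt", some (PySem.Str.strip (parts.headD ""))),
   ("style", findField "style" rev),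
   ("location", findField "location" rev),
   ("art_style", findField "art" rev)]

-- ===== PRECONDITION & SPEC =====
def Spec_parse_user_input (user_text : String) (out : List (String × Option String)) : Prop := out = parse_user_input_alt user_text
instance (user_text : String) (out : List (String × Option String)) : Decidable (Spec_parse_user_input user_text out) := by unfold Spec_parse_user_input; infer_instance

-- ===== CLAIM =====
def Claim_equal_parse_user_input : Prop := ∀ (user_text : String), Dom_parse_user_input user_text → Spec_parse_user_input user_text (parse_user_input user_text)

-- ===== LEMMAS AND PROOFS =====

-- what a single part contributes to field `name` (some value iff it is a matching key:value pair)
def checkOne (name raw : String) : Option String :=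
  let part := PySem.Str.strip raw
  if PySem.Str.isIn ":" part then
    if pvKey part == name then some (pvVal part) else none
  else none

-- "later wins": a found value overrides the default
def upd (o d : Option String) : Option String := match o with | some v => some v | none => d

theorem upd_assoc (x y d : Option String) : upd (upd x y) d = upd x (upd y d) := by
  cases x <;> rfl

theorem findField_append_single (name : String) (xs : List String) (y : String) :
    findField name (xs ++ [y]) = upd (findField name xs) (checkOne name y) := by
  induction xs with
  | nil =>
    simp only [List.nil_append]
    unfold findField checkOne
    simp only [upd]
    split <;> rfl
  | cons hd tl ih =>
    simp only [List.cons_append, findField]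
    split
    · split
      · rfl
      · exact ih
    · exact ih

-- the four-key shape A's result dict keeps throughout the loop
def mkRes (b s loc a : Option String) : PySem.Dict String (Option String) :=
  PySem.Dict.mk [("base_prompt", b), ("style", s), ("location", loc), ("art_style", a)]

theorem mkRes_insert_style (b s loc a v : Option String) :
    (mkRes b s loc a).insert "style" v = mkRes b v loc a := by
  apply PySem.Dict.ext
  rw [PySem.Dict.items_insert]
  simp [mkRes, PySem.Dict.contains]

theorem mkRes_insert_location (b s loc a v : Option String) :
    (mkRes b s loc a).insert "location" v = mkRes b s v a := by
  apply PySem.Dict.ext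
  rw [PySem.Dict.items_insert]
  simp [mkRes, PySem.Dict.contains]

theorem mkRes_insert_art (b s loc a v : Option String) :
    (mkRes b s loc a).insert "art_style" v = mkRes b s loc v := by
  apply PySem.Dict.ext
  rw [PySem.Dict.items_insert]
  simp [mkRes, PySem.Dict.contains]

-- one step of A's loop, expressed through checkOne
theorem stepA_eq (b s loc a : Option String) (hd : String) :
    stepA (mkRes b s loc a) hd
      = mkRes b (upd (checkOne "style" hd) s) (upd (checkOne "location" hd) loc)
               (upd (checkOne "art" hd) a) := by
  unfold stepA checkOne
  by_cases hin : PySem.Str.isIn ":" (PySem.Str.strip hd) = true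
  · simp only [hin, if_true]
    by_cases hk : pvKey (PySem.Str.strip hd) ∈ ["style", "location", "art"]
    · have hk' := hk
      simp only [List.mem_cons, List.not_mem_nil, or_false] at hk'
      rcases hk' with h | h | h <;> rw [if_pos hk] <;> rw [h]
      · simp [mkRes_insert_style, upd]
      · simp [mkRes_insert_location, upd]
      · simp [mkRes_insert_art, upd]
    · rw [if_neg hk]
      simp only [List.mem_cons, List.not_mem_nil, or_false, not_or] at hk
      obtain ⟨h1, h2, h3⟩ := hk
      have e1 : (pvKey (PySem.Str.strip hd) == "style") = false := by
        simp; exact h1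
      have e2 : (pvKey (PySem.Str.strip hd) == "location") = false := by
        simp; exact h2
      have e3 : (pvKey (PySem.Str.strip hd) == "art") = false := by
        simp; exact h3
      simp [e1, e2, e3, upd]
  · simp only [Bool.not_eq_true] at hin
    have hin' : PySem.Chars.isIn [':'] (PySem.Chars.strip hd.toList) = false := by
      simpa [PySem.Str.isIn, PySem.Str.strip] using hin
    simp [hin', upd]

-- loop invariant: A's fold equals the three backward searches applied over the defaults
theorem pv_loop_inv (l : List String) (b s loc a : Option String) :
    l.foldl stepA (mkRes b s loc a)
      = mkRes b (upd (findField "style" l.reverse) s)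
               (upd (findField "location" l.reverse) loc)
               (upd (findField "art" l.reverse) a) := by
  induction l generalizing s loc a with
  | nil => rfl
  | cons hd tl ih =>
    rw [List.foldl_cons, stepA_eq, ih]
    have hrev : (hd :: tl).reverse = tl.reverse ++ [hd] := by simp
    rw [hrev]
    rw [findField_append_single, findField_append_single, findField_append_single]
    rw [upd_assoc, upd_assoc, upd_assoc]

theorem parse_user_input_spec : Claim_equal_parse_user_input := by
  intro user_text _
  unfold Spec_parse_user_input parse_user_input parse_user_input_alt
  have hinit : (((PySem.Dict.empty.insert "base_prompt"
        (some (PySem.Str.strip (((PySem.Str.split? user_text "|").getD []).headD "")))).insert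
        "style" none).insert "location" none).insert "art_style" (none : Option String)
      = mkRes (some (PySem.Str.strip (((PySem.Str.split? user_text "|").getD []).headD "")))
          none none none := rfl
  dsimp only
  rw [hinit, pv_loop_inv]
  cases findField "style" (((PySem.Str.split? user_text "|").getD []).drop 1).reverse <;>
  cases findField "location" (((PySem.Str.split? user_text "|").getD []).drop 1).reverse <;>
  cases findField "art" (((PySem.Str.split? user_text "|").getD []).drop 1).reverse <;> rfl
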